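-- pv_equiv track=rewrite | github.com/fwibblesticks/base-1-1000-encoder-decoder | main.py | encode_base_n
-- ===== SOURCE A (Python) =====
-- def create_base_chars(base):
--     chars = '0123456789ABCDEFGHIJKLMNOPQRSTUVWXYZabcdefghijklmnopqrstuvwxyz'
--     if base <= len(chars):
--         return chars[:base]
--
--     # Extended chars if base is bigger than 62
--     extended_chars = list(chars)
--     for i in range(len(chars), base):
--         extended_chars.append(chr(i + 128))
--     return ''.join(extended_chars)
--
-- def encode_base_n(text, base):
--     if base == 1:
--         # Special case for base-1 (unary)
--         return '1' * sum(ord(c) for c in text)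
--
--     decimal = 0
--     for char in text:
--         decimal = decimal * 256 + ord(char)
--
--     if decimal == 0:
--         return '0'
--
--     # Convert decimal to desired base
--     base_chars = create_base_chars(base)
--     result = ''
--     while decimal > 0:
--         decimal, remainder = divmod(decimal, base)
--         result = base_chars[remainder] + result
--
--     return result
-- ===== SOURCE B (Python) =====
-- _CHARS = '0123456789ABCDEFGHIJKLMNOPQRSTUVWXYZabcdefghijklmnopqrstuvwxyz'
--
-- def _digit(r):
--     # digit r of the alphabet: the 62 alphanumerics, then chr(r + 128)
--     return _CHARS[r] if r < 62 else chr(r + 128)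
--
-- def encode_base_n(text, base):
--     if base == 1:
--         # unary: one '1' per unit of the total character value
--         return '1' * sum(map(ord, text))
--     # value of the text as a place-value sum, scanned right-to-left
--     n = 0
--     p = 1
--     for c in reversed(text):
--         n += ord(c) * p
--         p *= 256
--     if n == 0:
--         return '0'
--     # digits most-significant first: find the highest power of base not
--     # exceeding n, then peel one digit per descending power
--     p = 1
--     while p * base <= n:
--         p *= base
--     out = []
--     while p > 0:
--         out.append(_digit(n // p))
--         n %= p
--         p //= base
--     return ''.join(out)
-- ===== Notes on version B (the rewrite author's own statement) =====
-- stated objective: alternative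
-- what changed: B emits digits most-significant-first by first growing the largest power of the base not exceeding the value and then peeling one digit per descending power (n//p, n%=p, p//=base), instead of A's least-significant-first repeated divmod with string prepends; B also computes the text's value as a right-to-left place-value sum with a running power of 256 instead of A's left-to-right Horner fold, and computes each digit character directly instead of building A's alphabet table.
-- outside the precondition, e.g. on encode_base_n('B', -5): A returns 'r', B returns ''; on encode_base_n('A', 60000): A returns 'Á', B returns 'Á'
import Mathlib
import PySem

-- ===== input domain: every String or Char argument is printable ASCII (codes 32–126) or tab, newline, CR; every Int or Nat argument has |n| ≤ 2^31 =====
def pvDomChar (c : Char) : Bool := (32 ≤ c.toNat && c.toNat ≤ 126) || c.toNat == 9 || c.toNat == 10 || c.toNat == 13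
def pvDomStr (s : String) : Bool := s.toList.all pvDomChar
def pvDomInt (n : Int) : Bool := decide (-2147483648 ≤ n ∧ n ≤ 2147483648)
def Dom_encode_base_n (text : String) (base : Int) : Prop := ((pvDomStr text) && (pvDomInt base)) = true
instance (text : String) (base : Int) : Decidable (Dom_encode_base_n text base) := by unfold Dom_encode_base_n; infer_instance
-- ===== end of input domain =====

-- B emits digits most-significant-first by descending powers of the base (no alphabet table,
-- no prepends) and values the text by a right-to-left place-value sum (objective: alternative).

-- ===== PORT A =====
-- A's strings are carried as their char lists (PySem.Str functions are thin wrappers over List Char).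
def pvChars : List Char := "0123456789ABCDEFGHIJKLMNOPQRSTUVWXYZabcdefghijklmnopqrstuvwxyz".toList

-- chr(n): exact for codepoints below the surrogate range (guaranteed by Pre_encode_base_n's upper bound)
def pvChr (n : Int) : Char := Char.ofNat n.toNat

def create_base_chars (base : Int) : List Char :=
  if base ≤ PySem.List.len pvChars then
    PySem.List.slice pvChars none (some base)
  else
    -- the append loop, ported with the reverse-accumulator idiom (same traversal, same appended
    -- elements in the same order; cons+reverse instead of quadratic snoc)
    pvChars ++ ((PySem.List.pyRange (PySem.List.len pvChars) base 1).foldl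
      (fun acc i => pvChr (i + 128) :: acc) []).reverse

-- the 'while decimal > 0' loop; fuel decimal.toNat + 1 suffices for base ≥ 2 (Pre_)
def encodeLoopA (bc : List Char) (base : Int) : Nat → Int → List Char → List Char
  | 0, _, result => result
  | fuel + 1, decimal, result =>
    if decimal > 0 then
      match PySem.Int.divmod? decimal base with
      | none => result   -- ZeroDivisionError (base = 0); outside Pre_
      | some (d, r) => encodeLoopA bc base fuel d (PySem.List.pyGetD bc r ' ' :: result)
    else result

def encode_base_n (text : String) (base : Int) : String :=
  if base = 1 then
    String.ofList (PySem.List.pyRepeat ['1'] ((text.toList.map (fun c => (c.toNat : Int))).sum))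
  else
    let decimal := text.toList.foldl (fun d c => d * 256 + (c.toNat : Int)) 0
    if decimal = 0 then "0"
    else
      let base_chars := create_base_chars base
      String.ofList (encodeLoopA base_chars base (decimal.toNat + 1) decimal [])

-- ===== PORT B =====
-- digit r of the alphabet: the 62 alphanumerics, then chr(r + 128)
def pvDigit (r : Int) : Char :=
  if r < 62 then PySem.List.pyGetD pvChars r ' ' else pvChr (r + 128)

-- n = 0; p = 1; for c in reversed(text): n += ord(c) * p; p *= 256
def pvPlaceVal (cs : List Char) : Int × Int :=
  cs.reverse.foldl (fun st c => (st.1 + (c.toNat : Int) * st.2, st.2 * 256)) (0, 1)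

-- while p * base <= n: p *= base   (fueled; fuel n.toNat + 1 suffices for base ≥ 2)
def pvFindPow (base n : Int) : Nat → Int → Int
  | 0, p => p
  | fuel + 1, p => if p * base ≤ n then pvFindPow base n fuel (p * base) else p

-- while p > 0: out.append(_digit(n // p)); n %= p; p //= base   (fueled likewise)
def pvPeelLoop (base : Int) : Nat → Int → Int → List Char → List Char
  | 0, _, _, out => out
  | fuel + 1, p, n, out =>
    if p > 0 then
      pvPeelLoop base fuel (PySem.Int.floordiv p base) (PySem.Int.mod n p)
        (out ++ [pvDigit (PySem.Int.floordiv n p)])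
    else out

def encode_base_n_alt (text : String) (base : Int) : String :=
  if base = 1 then
    String.ofList (PySem.List.pyRepeat ['1'] ((text.toList.map (fun c => (c.toNat : Int))).sum))
  else
    let n := (pvPlaceVal text.toList).1
    if n = 0 then "0"
    else
      let p := pvFindPow base n (n.toNat + 1) 1
      String.ofList (pvPeelLoop base (n.toNat + 1) p n [])

-- ===== PRECONDITION & SPEC =====
-- Pre_ excludes base ≤ 0, where A either raises ZeroDivisionError or produces its value through
-- negative string slicing and negative-index wraparound (an artefact of A's implementation), and
-- base > 55168, where A's extended digit alphabet reaches lone UTF-16 surrogates, so A's return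
-- value (when it does not raise ValueError in chr) is not representable as a Lean String.
def Pre_encode_base_n (_text : String) (base : Int) : Prop := 1 ≤ base ∧ base ≤ 55168
instance (text : String) (base : Int) : Decidable (Pre_encode_base_n text base) := by
  unfold Pre_encode_base_n; infer_instance

def pvWitness_encode_base_n : String × Int := ("Hi!", 16)

def Spec_encode_base_n (text : String) (base : Int) (out : String) : Prop := out = encode_base_n_alt text base
instance (text : String) (base : Int) (out : String) : Decidable (Spec_encode_base_n text base out) := by
  unfold Spec_encode_base_n; infer_instance

-- ===== CLAIM (what is proved, stated in full; the proofs are below) =====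
def Claim_equal_encode_base_n : Prop := ∀ (text : String) (base : Int), Dom_encode_base_n text base → Pre_encode_base_n text base → Spec_encode_base_n text base (encode_base_n text base)

-- ===== LEMMAS AND PROOFS =====

-- the reverse-accumulator fold is the map of the loop body over the range
lemma pv_foldl_cons_reverse_acc {α β : Type} (f : α → β) :
    ∀ (l : List α) (acc : List β),
      l.foldl (fun a i => f i :: a) acc = (l.map f).reverse ++ acc := by
  intro l
  induction l with
  | nil => intro acc; simp
  | cons x l ih => intro acc; simp [ih]

lemma pv_foldl_cons_reverse {α β : Type} (f : α → β) (l : List α) :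
    (l.foldl (fun a i => f i :: a) []).reverse = l.map f := by
  rw [pv_foldl_cons_reverse_acc]; simp

-- A's digit table agrees with B's digit function on every remainder 0 ≤ r < base
lemma pv_table_eq_digit (base : Int) (hb : 2 ≤ base) (r : Int) (h0 : 0 ≤ r) (hr : r < base) :
    PySem.List.pyGetD (create_base_chars base) r ' ' = pvDigit r := by
  have hlen : pvChars.length = 62 := by decide
  unfold create_base_chars
  by_cases h62 : base ≤ PySem.List.len pvChars
  · -- base ≤ 62: the table is chars[:base]
    simp only [if_pos h62]
    rw [PySem.List.slice_to pvChars (by omega)]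
    have hr62 : r < 62 := by
      simp [PySem.List.len_eq, hlen] at h62; omega
    have hlt : r < ((pvChars.take base.toNat).length : Int) := by
      simp [List.length_take, hlen]; omega
    rw [PySem.List.pyGetD_eq_getElem _ _ h0 hlt]
    unfold pvDigit
    rw [if_pos hr62,
        PySem.List.pyGetD_eq_getElem _ _ h0 (by simp [hlen]; omega)]
    exact List.getElem_take
  · -- base > 62: the table is chars ++ [chr(i+128) for i in range(62, base)]
    simp only [if_neg h62]
    rw [pv_foldl_cons_reverse]
    have hlen' : (PySem.List.len pvChars) = (62 : Int) := by
      simp [PySem.List.len_eq, hlen]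
    rw [hlen', PySem.List.pyRange_one]
    rw [List.map_map]
    set f : Nat → Char := (fun i => pvChr (i + 128)) ∘ (fun k : Nat => (62 : Int) + ↑k) with hf
    have hb62 : (62 : Int) < base := by
      simp [PySem.List.len_eq, hlen] at h62; omega
    have hlt : r < ((pvChars ++ (List.range (base - 62).toNat).map f).length : Int) := by
      simp [hlen, List.length_range]; omega
    rw [PySem.List.pyGetD_eq_getElem _ _ h0 hlt]
    by_cases hr62 : r < 62
    · rw [List.getElem_append_left (by simp [hlen]; omega)]
      unfold pvDigit
      rw [if_pos hr62, PySem.List.pyGetD_eq_getElem _ _ h0 (by simp [hlen]; omega)]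
    · rw [List.getElem_append_right (by simp [hlen]; omega)]
      rw [List.getElem_map, List.getElem_range]
      unfold pvDigit
      rw [if_neg hr62]
      simp only [hf, Function.comp, pvChr]
      congr 1
      simp [hlen]
      omega

-- the common digit-string spec: padRev b k n = the k lowest base-b digits of n, most significant first
def pvPadRev (b : Int) : Nat → Int → List Char
  | 0, _ => []
  | k + 1, n => pvDigit (PySem.Int.floordiv n (b ^ k)) :: pvPadRev b k (PySem.Int.mod n (b ^ k))

lemma pv_floordiv_one (n : Int) : PySem.Int.floordiv n 1 = n := by
  rw [PySem.Int.floordiv_eq_ediv_of_pos (by omega)]; exact Int.ediv_one n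

-- n % (b*m) / b = (n / b) % m  for 0 < b, 0 < m (floor = Euclidean versions, positive divisors)
lemma pv_emod_mul_ediv (n b m : Int) (hb : 0 < b) (hm : 0 < m) :
    n % (b * m) / b = n / b % m := by
  have hbm : 0 < b * m := by positivity
  have hr0 : 0 ≤ n % (b * m) := Int.emod_nonneg n (by omega)
  have hrlt : n % (b * m) < b * m := Int.emod_lt_of_pos n hbm
  have hdec : n = n % (b * m) + b * (m * (n / (b * m))) := by
    have := Int.mul_ediv_add_emod n (b * m); linarith
  have h1 : n / b = n % (b * m) / b + m * (n / (b * m)) := by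
    conv_lhs => rw [hdec]
    rw [Int.add_mul_ediv_left _ _ (by omega : b ≠ 0)]
  have h2 : 0 ≤ n % (b * m) / b := Int.ediv_nonneg hr0 (by omega)
  have h3 : n % (b * m) / b < m := by
    rw [Int.ediv_lt_iff_lt_mul hb]
    calc n % (b * m) < b * m := hrlt
      _ = m * b := by ring
  rw [h1, Int.add_mul_emod_self_left, Int.emod_eq_of_lt h2 h3]

-- peeling the least-significant digit off a (k+1)-digit window, for n inside the window
lemma pv_padRev_peel (b : Int) (hb : 2 ≤ b) :
    ∀ (k : Nat) (n : Int), 0 ≤ n → n < b ^ (k + 1) →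
      pvPadRev b (k + 1) n
        = pvPadRev b k (PySem.Int.floordiv n b) ++ [pvDigit (PySem.Int.mod n b)] := by
  intro k
  induction k with
  | zero =>
    intro n h0 hlt
    simp only [pvPadRev, pow_zero]
    rw [pv_floordiv_one, PySem.Int.mod_eq_emod_of_pos (by omega),
        Int.emod_eq_of_lt h0 (by simpa using hlt), List.nil_append]
  | succ k ih =>
    intro n h0 hlt
    have hbpos : (0 : Int) < b := by omega
    have hpk : (0 : Int) < b ^ k := by positivity
    have hpk1 : (0 : Int) < b ^ (k + 1) := by positivity
    show pvDigit (PySem.Int.floordiv n (b ^ (k + 1)))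
          :: pvPadRev b (k + 1) (PySem.Int.mod n (b ^ (k + 1)))
        = (pvDigit (PySem.Int.floordiv (PySem.Int.floordiv n b) (b ^ k))
          :: pvPadRev b k (PySem.Int.mod (PySem.Int.floordiv n b) (b ^ k)))
          ++ [pvDigit (PySem.Int.mod n b)]
    have hmod0 : 0 ≤ PySem.Int.mod n (b ^ (k + 1)) := PySem.Int.mod_nonneg n hpk1
    have hmodlt : PySem.Int.mod n (b ^ (k + 1)) < b ^ (k + 1) := PySem.Int.mod_lt n hpk1
    rw [List.cons_append]
    congr 1
    · -- heads: n // b^(k+1) = (n // b) // b^k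
      rw [PySem.Int.floordiv_eq_ediv_of_pos hpk1, PySem.Int.floordiv_eq_ediv_of_pos hpk,
          PySem.Int.floordiv_eq_ediv_of_pos hbpos,
          Int.ediv_ediv_of_nonneg (show (0:Int) ≤ b by omega), ← pow_succ']
    · -- tails: apply the IH at n % b^(k+1)
      rw [ih (PySem.Int.mod n (b ^ (k + 1))) hmod0 hmodlt]
      have e1 : PySem.Int.floordiv (PySem.Int.mod n (b ^ (k + 1))) b
          = PySem.Int.mod (PySem.Int.floordiv n b) (b ^ k) := by
        rw [PySem.Int.mod_eq_emod_of_pos hpk1, PySem.Int.floordiv_eq_ediv_of_pos hbpos,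
            PySem.Int.floordiv_eq_ediv_of_pos hbpos, PySem.Int.mod_eq_emod_of_pos hpk,
            show b ^ (k + 1) = b * b ^ k from (pow_succ' b k),
            pv_emod_mul_ediv n b (b ^ k) hbpos hpk]
      have e2 : PySem.Int.mod (PySem.Int.mod n (b ^ (k + 1))) b = PySem.Int.mod n b := by
        rw [PySem.Int.mod_eq_emod_of_pos hpk1, PySem.Int.mod_eq_emod_of_pos hbpos,
            PySem.Int.mod_eq_emod_of_pos hbpos]
        exact Int.emod_emod_of_dvd n (dvd_pow_self b (Nat.succ_ne_zero k))
      rw [e1, e2]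

-- A's loop on a zero value returns its accumulator
lemma pv_loopA_zero (bc : List Char) (b : Int) (fuel : Nat) (res : List Char) :
    encodeLoopA bc b fuel 0 res = res := by
  cases fuel <;> simp [encodeLoopA]

-- A's LSB divmod loop computes the padRev digit string (for n in the k+1-digit window, top digit ≥ 1)
lemma pv_loopA_eq_padRev (b : Int) (hb : 2 ≤ b) :
    ∀ (k : Nat) (n : Int) (res : List Char) (fuel : Nat),
      b ^ k ≤ n → n < b ^ (k + 1) → k + 1 ≤ fuel →
      encodeLoopA (create_base_chars b) b fuel n res = pvPadRev b (k + 1) n ++ res := by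
  intro k
  induction k with
  | zero =>
    intro n res fuel h1 h2 hfuel
    obtain ⟨fuel, rfl⟩ : ∃ f, fuel = f + 1 := ⟨fuel - 1, by omega⟩
    have hpos : n > 0 := by simpa using h1
    have hdm : PySem.Int.divmod? n b
        = some (PySem.Int.floordiv n b, PySem.Int.mod n b) := by
      simp [PySem.Int.divmod?, show b ≠ 0 by omega, PySem.Int.floordiv, PySem.Int.mod]
    simp only [encodeLoopA, if_pos hpos, hdm]
    have hdiv : PySem.Int.floordiv n b = 0 := by
      rw [PySem.Int.floordiv_eq_ediv_of_pos (by omega)]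
      exact Int.ediv_eq_zero_of_lt (by omega) (by simpa using h2)
    have hmod : PySem.Int.mod n b = n := by
      rw [PySem.Int.mod_eq_emod_of_pos (by omega)]
      exact Int.emod_eq_of_lt (by omega) (by simpa using h2)
    rw [hdiv, hmod, pv_loopA_zero]
    have ht := pv_table_eq_digit b hb n (by omega) (by simpa using h2)
    simp [pvPadRev, ht]
  | succ k ih =>
    intro n res fuel h1 h2 hfuel
    obtain ⟨fuel, rfl⟩ : ∃ f, fuel = f + 1 := ⟨fuel - 1, by omega⟩
    have hbpos : (0 : Int) < b := by omega
    have hpk1 : (0 : Int) < b ^ (k + 1) := by positivity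
    have hpos : n > 0 := by nlinarith
    have hdm : PySem.Int.divmod? n b
        = some (PySem.Int.floordiv n b, PySem.Int.mod n b) := by
      simp [PySem.Int.divmod?, show b ≠ 0 by omega, PySem.Int.floordiv, PySem.Int.mod]
    simp only [encodeLoopA, if_pos hpos, hdm]
    have hq1 : b ^ k ≤ PySem.Int.floordiv n b := by
      rw [PySem.Int.le_floordiv_iff_mul_le hbpos]
      calc b ^ k * b = b ^ (k + 1) := (pow_succ b k).symm
        _ ≤ n := h1
    have hq2 : PySem.Int.floordiv n b < b ^ (k + 1) := by
      rw [PySem.Int.floordiv_lt_iff_lt_mul hbpos]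
      calc n < b ^ (k + 2) := h2
        _ = b ^ (k + 1) * b := (pow_succ b (k + 1))
    rw [ih (PySem.Int.floordiv n b) _ fuel hq1 hq2 (by omega)]
    rw [pv_padRev_peel b hb (k + 1) n (by omega) h2]
    have hmr : PySem.List.pyGetD (create_base_chars b) (PySem.Int.mod n b) ' '
        = pvDigit (PySem.Int.mod n b) :=
      pv_table_eq_digit b hb _ (PySem.Int.mod_nonneg n hbpos) (PySem.Int.mod_lt n hbpos)
    rw [hmr]
    simp

-- B's peel loop on a zero power returns its accumulator
lemma pv_peel_zero (b : Int) (fuel : Nat) (n : Int) (out : List Char) :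
    pvPeelLoop b fuel 0 n out = out := by
  cases fuel <;> simp [pvPeelLoop]

-- B's descending-powers loop, started at p = b^k, computes the padRev digit string
lemma pv_peel_eq_padRev (b : Int) (hb : 2 ≤ b) :
    ∀ (k : Nat) (n : Int) (out : List Char) (fuel : Nat), k + 1 ≤ fuel →
      pvPeelLoop b fuel (b ^ k) n out = out ++ pvPadRev b (k + 1) n := by
  intro k
  induction k with
  | zero =>
    intro n out fuel hfuel
    obtain ⟨fuel, rfl⟩ : ∃ f, fuel = f + 1 := ⟨fuel - 1, by omega⟩
    have h1b : PySem.Int.floordiv 1 b = 0 := by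
      rw [PySem.Int.floordiv_eq_ediv_of_pos (by omega)]
      exact Int.ediv_eq_zero_of_lt (by omega) (by omega)
    simp only [pvPeelLoop, pow_zero, if_pos (by omega : (1 : Int) > 0), h1b, pv_peel_zero]
    simp [pvPadRev]
  | succ k ih =>
    intro n out fuel hfuel
    obtain ⟨fuel, rfl⟩ : ∃ f, fuel = f + 1 := ⟨fuel - 1, by omega⟩
    have hbpos : (0 : Int) < b := by omega
    have hpk : (0 : Int) < b ^ k := by positivity
    have hppos : (0 : Int) < b ^ (k + 1) := by positivity
    have hdivp : PySem.Int.floordiv (b ^ (k + 1)) b = b ^ k := by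
      rw [PySem.Int.floordiv_eq_iff_of_pos hbpos]
      constructor
      · calc b ^ k * b = b ^ (k + 1) := (pow_succ b k).symm
          _ ≤ b ^ (k + 1) := le_refl _
      · nlinarith [pow_succ b k]
    simp only [pvPeelLoop, if_pos hppos, hdivp]
    rw [ih (PySem.Int.mod n (b ^ (k + 1))) _ fuel (by omega)]
    show out ++ [pvDigit (PySem.Int.floordiv n (b ^ (k + 1)))]
          ++ pvPadRev b (k + 1) (PySem.Int.mod n (b ^ (k + 1)))
        = out ++ pvPadRev b (k + 2) n
    simp [pvPadRev]

-- the power-finding loop: from p with p ≤ n, enough fuel yields the largest p·b^k not exceeding n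
lemma pv_findPow_spec (b n : Int) (hb : 2 ≤ b) :
    ∀ (fuel : Nat) (p : Int), 0 < p → p ≤ n → n < p * b ^ fuel →
      ∃ k : Nat, pvFindPow b n fuel p = p * b ^ k ∧ p * b ^ k ≤ n ∧ n < p * b ^ (k + 1) := by
  intro fuel
  induction fuel with
  | zero =>
    intro p hp hpn hlt
    simp only [pow_zero, mul_one] at hlt; omega
  | succ fuel ih =>
    intro p hp hpn hlt
    by_cases hstep : p * b ≤ n
    · obtain ⟨k, hk, hk1, hk2⟩ := ih (p * b) (by positivity) hstep
        (by calc n < p * b ^ (fuel + 1) := hlt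
              _ = p * b * b ^ fuel := by ring)
      refine ⟨k + 1, ?_, ?_, ?_⟩
      · simp only [pvFindPow, if_pos hstep, hk]; ring
      · calc p * b ^ (k + 1) = p * b * b ^ k := by ring
          _ ≤ n := hk1
      · calc n < p * b * b ^ (k + 1) := hk2
          _ = p * b ^ (k + 2) := by ring
    · exact ⟨0, by simp [pvFindPow, hstep], by simpa using hpn,
        by simpa using not_le.mp hstep⟩

-- Horner with an arbitrary initial value
lemma pv_horner_init (cs : List Char) :
    ∀ a : Int, cs.foldl (fun d c => d * 256 + (c.toNat : Int)) a
      = a * 256 ^ cs.length + cs.foldl (fun d c => d * 256 + (c.toNat : Int)) 0 := by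
  induction cs with
  | nil => intro a; simp
  | cons c cs ih =>
    intro a
    simp only [List.foldl_cons, List.length_cons]
    rw [ih (a * 256 + (c.toNat : Int)), ih ((0 : Int) * 256 + (c.toNat : Int))]
    ring

-- B's right-to-left place-value fold computes A's Horner value (with the running power alongside)
lemma pv_placeVal_eq_horner (cs : List Char) :
    ∀ (a p : Int),
      cs.reverse.foldl (fun st c => (st.1 + (c.toNat : Int) * st.2, st.2 * 256)) (a, p)
        = (a + p * cs.foldl (fun d c => d * 256 + (c.toNat : Int)) 0, p * 256 ^ cs.length) := by
  induction cs with
  | nil => intro a p; simp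
  | cons c cs ih =>
    intro a p
    rw [List.reverse_cons, List.foldl_append, ih a p]
    simp only [List.foldl_cons, List.foldl_nil, List.length_cons]
    rw [show cs.foldl (fun d c => d * 256 + (c.toNat : Int)) ((0 : Int) * 256 + (c.toNat : Int))
          = ((0 : Int) * 256 + (c.toNat : Int)) * 256 ^ cs.length
            + cs.foldl (fun d c => d * 256 + (c.toNat : Int)) 0 from pv_horner_init cs _]
    rw [Prod.mk.injEq]
    exact ⟨by ring, by ring⟩

-- the Horner value of a char list is nonnegative
lemma pv_horner_nonneg (cs : List Char) :
    ∀ a : Int, 0 ≤ a → 0 ≤ cs.foldl (fun d c => d * 256 + (c.toNat : Int)) a := by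
  induction cs with
  | nil => intro a ha; simpa using ha
  | cons c cs ih =>
    intro a ha
    exact ih _ (by positivity)

-- ===== VERDICT (by name: the statement is the Claim_ definition above) =====
theorem encode_base_n_spec : Claim_equal_encode_base_n := by
  intro text base _hdom hpre
  obtain ⟨h1, _h2⟩ := hpre
  unfold Spec_encode_base_n encode_base_n encode_base_n_alt
  by_cases hb1 : base = 1
  · simp [hb1]
  · have hb : 2 ≤ base := by omega
    simp only [if_neg hb1]
    set cs := text.toList with hcs
    set n := cs.foldl (fun d c => d * 256 + (c.toNat : Int)) 0 with hn
    have hval : (pvPlaceVal cs).1 = n := by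
      unfold pvPlaceVal
      rw [pv_placeVal_eq_horner cs 0 1]
      show 0 + 1 * (cs.foldl (fun d c => d * 256 + (c.toNat : Int)) 0) = n
      rw [hn]; ring
    rw [hval]
    by_cases h0 : n = 0
    · simp [h0]
    · simp only [if_neg h0]
      have hn0 : 0 < n := lt_of_le_of_ne (pv_horner_nonneg cs 0 le_rfl) (Ne.symm h0)
      -- fuel bound: n < b ^ (n.toNat + 1)
      have hfuel : n < base ^ (n.toNat + 1) := by
        have h2p : n.toNat < 2 ^ (n.toNat + 1) :=
          lt_of_lt_of_le (Nat.lt_two_pow_self) (Nat.pow_le_pow_right (by omega) (by omega))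
        have hbp : (2 : Nat) ^ (n.toNat + 1) ≤ base.toNat ^ (n.toNat + 1) :=
          Nat.pow_le_pow_left (by omega) _
        have : n.toNat < base.toNat ^ (n.toNat + 1) := lt_of_lt_of_le h2p hbp
        calc n = (n.toNat : Int) := by omega
          _ < ((base.toNat ^ (n.toNat + 1) : Nat) : Int) := by exact_mod_cast this
          _ = base ^ (n.toNat + 1) := by
              push_cast [Int.toNat_of_nonneg (by omega : (0:Int) ≤ base)]; ring
      obtain ⟨k, hfp, hk1, hk2⟩ :=
        pv_findPow_spec base n hb (n.toNat + 1) 1 (by omega) (by omega) (by simpa using hfuel)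
      simp only [one_mul] at hfp hk1 hk2
      -- the digit count fits in the fuel: k + 1 ≤ n.toNat + 1
      have hkfuel : k + 1 ≤ n.toNat + 1 := by
        have h2k : (k : Int) < 2 ^ k := by exact_mod_cast Nat.lt_two_pow_self
        have hbk : (2 : Int) ^ k ≤ base ^ k := pow_le_pow_left₀ (by omega) (by omega) k
        omega
      rw [hfp, pv_peel_eq_padRev base hb k n [] (n.toNat + 1) hkfuel,
          pv_loopA_eq_padRev base hb k n [] (n.toNat + 1) hk1 hk2 hkfuel]
      simp
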